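-- pv_equiv track=rewrite | github.com/madSUNitist/noteblock-music-compression | compression_nbs/lz77.py | parse_to_columns
-- ===== SOURCE A (Python) =====
-- def parse_to_columns(data):
--     """
--     data: list of (tick, pitch)
--     returns: list of tuples, each tuple is sorted pitches in that tick
--     """
--     from collections import defaultdict
--     tick_map = defaultdict(list)
--     for tick, pitch in data:
--         tick_map[tick].append(pitch)
--     # sort by tick
--     ticks = sorted(tick_map.keys())
--     columns = []
--     for t in ticks:
--         pitches = sorted(tick_map[t])
--         columns.append(tuple(pitches))
--     return columns, ticks
-- ===== SOURCE B (Python) =====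
-- from itertools import groupby
--
--
-- def parse_to_columns(data):
--     """
--     data: list of (tick, pitch)
--     returns: list of tuples, each tuple is sorted pitches in that tick
--     """
--     columns = []
--     ticks = []
--     for tick, grp in groupby(sorted(data), key=lambda tp: tp[0]):
--         columns.append(tuple(p for _, p in grp))
--         ticks.append(tick)
--     return columns, ticks
-- ===== Notes on version B (the rewrite author's own statement) =====
-- stated objective: idiomatic
-- what changed: Replaced the defaultdict bucketing plus per-bucket sorting with one global lexicographic sort of the (tick, pitch) pairs followed by a single itertools.groupby pass that emits each tick's already-ordered pitches.
import Mathlib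
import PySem

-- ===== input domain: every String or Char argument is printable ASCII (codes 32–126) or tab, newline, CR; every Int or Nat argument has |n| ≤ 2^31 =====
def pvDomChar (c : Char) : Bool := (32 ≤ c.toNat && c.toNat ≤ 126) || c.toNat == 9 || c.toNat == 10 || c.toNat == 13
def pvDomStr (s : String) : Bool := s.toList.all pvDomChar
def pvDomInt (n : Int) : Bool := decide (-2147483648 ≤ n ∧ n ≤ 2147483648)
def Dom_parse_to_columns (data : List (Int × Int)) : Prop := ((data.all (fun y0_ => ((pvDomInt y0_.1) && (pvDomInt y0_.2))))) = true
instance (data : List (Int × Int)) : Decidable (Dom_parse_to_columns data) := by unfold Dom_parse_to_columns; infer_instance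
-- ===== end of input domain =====

-- B replaces A's defaultdict bucketing plus per-bucket sorting by one global sort and a single
-- linear grouping pass (idiomatic itertools.groupby style); return values are identical.

-- ===== PORT A =====
def parse_to_columns (data : List (Int × Int)) : List (List Int) × List Int :=
  let tick_map := data.foldl (fun d tp => d.modify tp.1 [] (fun l => l ++ [tp.2])) PySem.Dict.empty
  let ticks := PySem.List.sorted tick_map.keys (fun x => x)
  let columns := ticks.foldl (fun acc t => acc ++ [PySem.List.sorted (tick_map.getD t []) (fun x => x)]) []
  (columns, ticks)

-- ===== PORT B =====
-- the inner consumption of one groupby group: pitches while the tick stays `t`, plus the rest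
def pvTakeRun (t : Int) : List (Int × Int) → List Int × List (Int × Int)
  | [] => ([], [])
  | (t', p) :: rest =>
    if t' = t then (p :: (pvTakeRun t rest).1, (pvTakeRun t rest).2)
    else ([], (t', p) :: rest)

theorem pvTakeRun_len (t : Int) (l : List (Int × Int)) : (pvTakeRun t l).2.length ≤ l.length := by
  induction l with
  | nil => simp [pvTakeRun]
  | cons h tl ih =>
    obtain ⟨t', p⟩ := h
    simp only [pvTakeRun]
    split <;> simp <;> omega

-- the groupby loop over the sorted data
def pvGroups : List (Int × Int) → List (List Int) × List Int
  | [] => ([], [])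
  | (t, p) :: rest =>
    ((p :: (pvTakeRun t rest).1) :: (pvGroups (pvTakeRun t rest).2).1,
      t :: (pvGroups (pvTakeRun t rest).2).2)
termination_by l => l.length
decreasing_by simpa using Nat.lt_succ_of_le (pvTakeRun_len t rest)

def parse_to_columns_alt (data : List (Int × Int)) : List (List Int) × List Int :=
  pvGroups (PySem.List.sorted2 data (fun tp => tp.1) (fun tp => tp.2))

-- ===== PRECONDITION & SPEC =====
def Spec_parse_to_columns (data : List (Int × Int)) (out : List (List Int) × List Int) : Prop := out = parse_to_columns_alt data
instance (data : List (Int × Int)) (out : List (List Int) × List Int) : Decidable (Spec_parse_to_columns data out) := by unfold Spec_parse_to_columns; infer_instance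

-- ===== CLAIM (what is proved, stated in full; the proofs are below) =====
def Claim_equal_parse_to_columns : Prop := ∀ (data : List (Int × Int)), Dom_parse_to_columns data → Spec_parse_to_columns data (parse_to_columns data)

-- ===== LEMMAS AND PROOFS =====

-- the lexicographic order the global sort establishes
def pvLex (a b : Int × Int) : Prop := a.1 < b.1 ∨ (a.1 = b.1 ∧ a.2 ≤ b.2)

theorem pv_pairwise_insertBy {α : Type} (R : α → α → Prop) (before : α → α → Bool)
    (hT : ∀ {a b c}, R a b → R b c → R a c) (h1 : ∀ a b, before a b = true → R a b)
    (h2 : ∀ a b, before a b = false → R b a)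
    (x : α) (l : List α) (h : l.Pairwise R) :
    (PySem.List.insertBy before x l).Pairwise R := by
  induction l with
  | nil => simp [PySem.List.insertBy]
  | cons y ys ih =>
    rw [List.pairwise_cons] at h
    simp only [PySem.List.insertBy]
    split
    · rename_i hb
      refine List.Pairwise.cons ?_ (List.Pairwise.cons h.1 h.2)
      intro z hz
      rcases List.mem_cons.mp hz with rfl | hz
      · exact h1 _ _ hb
      · exact hT (h1 _ _ hb) (h.1 z hz)
    · rename_i hb
      refine List.Pairwise.cons ?_ (ih h.2)
      intro z hz
      rcases (PySem.List.mem_insertBy _ _ _ _).mp hz with rfl | hz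
      · exact h2 _ _ (Bool.eq_false_iff.mpr hb ▸ by simpa using hb)
      · exact h.1 z hz

theorem pvLex_trans {a b c : Int × Int} (hab : pvLex a b) (hbc : pvLex b c) : pvLex a c := by
  unfold pvLex at *
  omega

theorem pv_sorted2_pairwise (xs : List (Int × Int)) :
    (PySem.List.sorted2 xs (fun tp => tp.1) (fun tp => tp.2)).Pairwise pvLex := by
  show (List.foldl (fun acc x => PySem.List.insertBy _ x acc) [] xs).Pairwise pvLex
  suffices H : ∀ (l : List (Int × Int)) (acc : List (Int × Int)), acc.Pairwise pvLex →
      (List.foldl (fun acc x => PySem.List.insertBy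
        (fun a b => decide (a.1 < b.1) || (!decide (b.1 < a.1) && decide (a.2 < b.2))) x acc) acc l).Pairwise pvLex by
    exact H xs [] (by simp)
  intro l
  induction l with
  | nil => intro acc h; simpa
  | cons x t ih =>
    intro acc h
    refine ih _ (pv_pairwise_insertBy pvLex _ (fun h1 h2 => pvLex_trans h1 h2) ?_ ?_ x acc h)
    · intro a b hb
      simp at hb
      unfold pvLex; omega
    · intro a b hb
      simp at hb
      unfold pvLex; omega

theorem pvTakeRun_eq (t : Int) (l : List (Int × Int)) :
    pvTakeRun t l = ((l.takeWhile (fun p => p.1 == t)).map (·.2), l.dropWhile (fun p => p.1 == t)) := by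
  induction l with
  | nil => simp [pvTakeRun]
  | cons h tl ih =>
    obtain ⟨t', p⟩ := h
    simp only [pvTakeRun, List.takeWhile_cons, List.dropWhile_cons]
    by_cases ht : t' = t <;> simp [ht, ih]

theorem pv_dropWhile_gt (t : Int) (l : List (Int × Int)) (h : l.Pairwise (fun a b => a.1 ≤ b.1))
    (hb : ∀ x ∈ l, t ≤ x.1) :
    ∀ x ∈ l.dropWhile (fun p => p.1 == t), t < x.1 := by
  induction l with
  | nil => simp
  | cons a tl ih =>
    rw [List.pairwise_cons] at h
    by_cases ha : a.1 = t
    · rw [List.dropWhile_cons_of_pos (by simpa using ha)]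
      exact ih h.2 (fun x hx => hb x (List.mem_cons_of_mem a hx))
    · rw [List.dropWhile_cons_of_neg (by simpa using ha)]
      intro x hx
      rcases List.mem_cons.mp hx with rfl | hx
      · exact lt_of_le_of_ne (hb x (List.mem_cons_self)) (fun e => ha e.symm)
      · exact lt_of_lt_of_le (lt_of_le_of_ne (hb a List.mem_cons_self) (fun e => ha e.symm)) (h.1 x hx)

-- characterisation of the grouping pass on a fst-nondecreasing list
theorem pvGroups_spec : ∀ l : List (Int × Int), l.Pairwise (fun a b => a.1 ≤ b.1) →
    ((pvGroups l).2.Pairwise (· < ·)) ∧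
    (∀ t, t ∈ (pvGroups l).2 ↔ t ∈ l.map (·.1)) ∧
    (pvGroups l).1 = (pvGroups l).2.map (fun t => (l.filter (fun p => p.1 == t)).map (·.2)) := by
  intro l
  induction l using pvGroups.induct with
  | case1 => intro _; simp [pvGroups]
  | case2 t p rest ih =>
    intro h
    rw [List.pairwise_cons] at h
    obtain ⟨hb, h1⟩ := h
    have hb' : ∀ x ∈ rest, t ≤ x.1 := fun x hx => hb x hx
    have hgt := pv_dropWhile_gt t rest h1 hb'
    rw [pvTakeRun_eq] at ih
    have h1' : (rest.dropWhile (fun p => p.1 == t)).Pairwise (fun a b => a.1 ≤ b.1) :=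
      h1.sublist (List.dropWhile_sublist _)
    obtain ⟨ihp, ihm, ihc⟩ := ih h1'
    have htk : ∀ x ∈ rest.takeWhile (fun p => p.1 == t), x.1 = t :=
      fun x hx => by simpa using List.mem_takeWhile_imp hx
    have hsplit : rest.takeWhile (fun p => p.1 == t) ++ rest.dropWhile (fun p => p.1 == t) = rest :=
      List.takeWhile_append_dropWhile
    simp only [pvGroups, pvTakeRun_eq]
    refine ⟨?_, ?_, ?_⟩
    · refine List.Pairwise.cons ?_ ihp
      intro t' ht'
      obtain ⟨x, hx, rfl⟩ := List.mem_map.mp ((ihm t').mp ht')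
      exact hgt x hx
    · intro t0
      simp only [List.mem_cons, List.map_cons, ihm t0]
      constructor
      · rintro (rfl | h0)
        · left; rfl
        · right
          obtain ⟨x, hx, rfl⟩ := List.mem_map.mp h0
          exact List.mem_map.mpr ⟨x, List.IsSuffix.mem hx ⟨_, hsplit⟩, rfl⟩
      · rintro (rfl | h0)
        · left; rfl
        · obtain ⟨x, hx, rfl⟩ := List.mem_map.mp h0
          rw [← hsplit] at hx
          rcases List.mem_append.mp hx with hx | hx
          · left; exact htk x hx
          · right; exact List.mem_map.mpr ⟨x, hx, rfl⟩
    · simp only [List.map_cons]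
      congr 1
      · -- head column
        have hf : rest.filter (fun p => p.1 == t) = rest.takeWhile (fun p => p.1 == t) := by
          conv_lhs => rw [← hsplit]
          rw [List.filter_append,
            List.filter_eq_self.mpr (fun x hx => by simp [htk x hx]),
            List.filter_eq_nil_iff.mpr (fun x hx => by simpa using (hgt x hx).ne'), List.append_nil]
        rw [List.filter_cons_of_pos (by simp), hf]
        simp
      · rw [ihc]
        refine List.map_congr_left ?_
        intro t0 ht0
        have hne : t ≠ t0 := by
          obtain ⟨x, hx, rfl⟩ := List.mem_map.mp ((ihm t0).mp ht0)
          exact (hgt x hx).ne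
        have hf : rest.filter (fun p => p.1 == t0) =
            (rest.dropWhile (fun p => p.1 == t)).filter (fun p => p.1 == t0) := by
          conv_lhs => rw [← hsplit]
          rw [List.filter_append,
            List.filter_eq_nil_iff.mpr (fun x hx => by simp [htk x hx]; exact hne),
            List.nil_append]
        rw [List.filter_cons_of_neg (by simpa using hne), hf]

theorem parse_to_columns_spec' (data : List (Int × Int)) :
    parse_to_columns data = parse_to_columns_alt data := by
  unfold parse_to_columns parse_to_columns_alt
  have hperm : (PySem.List.sorted2 data (fun tp => tp.1) (fun tp => tp.2)).Perm data :=
    PySem.List.sorted2_perm data _ _ false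
  have hlex := pv_sorted2_pairwise data
  have hle : (PySem.List.sorted2 data (fun tp => tp.1) (fun tp => tp.2)).Pairwise
      (fun a b => a.1 ≤ b.1) := hlex.imp (by intro a b h; unfold pvLex at h; omega)
  obtain ⟨hp, hm, hc⟩ := pvGroups_spec _ hle
  have hkeys : (data.foldl (fun d tp => d.modify tp.1 [] (fun l => l ++ [tp.2]))
      (PySem.Dict.empty : PySem.Dict Int (List Int))).keys = PySem.Set.ofList (data.map (·.1)) := by
    rw [PySem.Dict.keys_foldl_modify_key data (fun tp => tp.1) [] (fun _ tp l => l ++ [tp.2])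
      PySem.Dict.empty]
    rfl
  have hticks : PySem.List.sorted (PySem.Set.ofList (data.map (·.1))) (fun x => x) =
      (pvGroups (PySem.List.sorted2 data (fun tp => tp.1) (fun tp => tp.2))).2 := by
    refine PySem.List.sorted_eq_of_perm_of_pairwise_lt _ _ _ ?_ hp
    refine (List.perm_ext_iff_of_nodup (hp.imp (fun h => h.ne)) (PySem.Set.nodup_ofList _)).mpr ?_
    intro a
    rw [hm a, PySem.Set.mem_ofList, (hperm.map (·.1)).mem_iff]
  simp only [hkeys, hticks, PySem.List.foldl_append_singleton_eq_map, List.nil_append]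
  refine Prod.ext ?_ rfl
  rw [hc]
  refine List.map_congr_left ?_
  intro t ht
  rw [PySem.Dict.getD_foldl_modify_append data PySem.Dict.empty t, PySem.Dict.getD_empty,
    List.nil_append]
  refine PySem.List.sorted_id_eq_of_perm_of_pairwise _ _ ((hperm.filter _).map _) ?_
  refine List.pairwise_map.mpr ?_
  refine (List.pairwise_filter).mpr (hlex.imp ?_)
  intro a b hab ha hb
  simp only [beq_iff_eq] at ha hb
  unfold pvLex at hab
  omega

-- ===== VERDICT (by name: the statement is the Claim_ definition above) =====
theorem parse_to_columns_spec : Claim_equal_parse_to_columns := by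
  intro data _
  show parse_to_columns data = parse_to_columns_alt data
  exact parse_to_columns_spec' data
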